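-- pv_equiv track=rewrite | github.com/PaddiSense/PaddiSense | PaddiSense/registry/python/paddisense_sensor.py | is_dev_mode
-- ===== SOURCE A (Python) =====
-- DEV_BRANCHES = {"dev", "develop", "development", "feature", "fix", "test", "local"}
--
-- def is_dev_mode(branch: str) -> bool:
--     """Check if current branch is a development branch (bypasses licensing)."""
--     if not branch or branch == "unknown":
--         return False
--     # Check exact match or prefix match for feature/fix branches
--     branch_lower = branch.lower()
--     for dev_branch in DEV_BRANCHES:
--         if branch_lower == dev_branch or branch_lower.startswith(f"{dev_branch}/"):
--             return True
--     return False
-- ===== SOURCE B (Python) =====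
-- DEV_BRANCHES = {"dev", "develop", "development", "feature", "fix", "test", "local"}
--
-- def is_dev_mode(branch: str) -> bool:
--     """Check if current branch is a development branch (bypasses licensing)."""
--     return branch.lower().split("/", 1)[0] in DEV_BRANCHES
-- ===== Notes on version B (the rewrite author's own statement) =====
-- stated objective: simpler
-- what changed: Replaces A's loop over every dev-branch candidate, testing equality or a slash-suffixed prefix match for each, by extracting the first slash-delimited segment of the lowered branch once and doing a single set-membership test; the explicit empty/unknown guards disappear too, since neither of those heads is a dev branch.
import Mathlib
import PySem

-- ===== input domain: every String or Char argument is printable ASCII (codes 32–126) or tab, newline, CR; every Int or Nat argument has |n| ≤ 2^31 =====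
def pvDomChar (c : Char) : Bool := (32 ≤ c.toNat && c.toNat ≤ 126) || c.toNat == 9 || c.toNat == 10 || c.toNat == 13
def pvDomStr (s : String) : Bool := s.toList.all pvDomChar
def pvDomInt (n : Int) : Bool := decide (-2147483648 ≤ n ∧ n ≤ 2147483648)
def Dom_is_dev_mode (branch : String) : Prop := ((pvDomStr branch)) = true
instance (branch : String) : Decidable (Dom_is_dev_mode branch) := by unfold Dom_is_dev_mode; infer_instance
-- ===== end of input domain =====

-- B replaces A's scan over every dev-branch candidate (equality or "cand/" prefix test) by
-- extracting the first '/'-segment of the lowered branch once and one set-membership test (objective: simpler).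


-- module constant DEV_BRANCHES (a Python set of distinct string literals; listed in insertion order)
def pvDevBranches : List String := ["dev", "develop", "development", "feature", "fix", "test", "local"]

-- ===== PORT A =====
def is_dev_mode (branch : String) : Bool :=
  -- if not branch or branch == "unknown": return False
  if branch == "" || branch == "unknown" then false
  else
    let branch_lower := PySem.Str.lower branch
    -- for dev_branch in DEV_BRANCHES: return True at the first hit (set iteration order is immaterial: a disjunction)
    pvDevBranches.any (fun dev_branch =>
      branch_lower == dev_branch || PySem.Str.startswith branch_lower (dev_branch ++ "/"))

-- ===== PORT B =====
def is_dev_mode_alt (branch : String) : Bool :=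
  -- return branch.lower().split("/", 1)[0] in DEV_BRANCHES
  match PySem.Str.splitMax? (PySem.Str.lower branch) "/" 1 with
  | some (head :: _) => pvDevBranches.contains head
  | _ => false

-- ===== PRECONDITION & SPEC =====
def Spec_is_dev_mode (branch : String) (out : Bool) : Prop := out = is_dev_mode_alt branch
instance (branch : String) (out : Bool) : Decidable (Spec_is_dev_mode branch out) := by unfold Spec_is_dev_mode; infer_instance

-- ===== CLAIM (what is proved, stated in full; the proofs are below) =====
def Claim_equal_is_dev_mode : Prop := ∀ (branch : String), Dom_is_dev_mode branch → Spec_is_dev_mode branch (is_dev_mode branch)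

-- ===== LEMMAS AND PROOFS =====

-- splitOnMax.go with maxsplit already 0 and a one-element accumulator: the first chunk is fixed
theorem pv_go_zero (fuel : Nat) (l cur a : List Char) :
    ∃ x, PySem.Chars.splitOnMax.go ['/'] fuel 0 l cur [a] = [a, x] := by
  cases fuel with
  | zero => exact ⟨cur.reverse ++ l, by simp [PySem.Chars.splitOnMax.go]⟩
  | succ n =>
    cases l with
    | nil => exact ⟨cur.reverse, by simp [PySem.Chars.splitOnMax.go]⟩
    | cons c r => exact ⟨cur.reverse ++ (c :: r), by simp [PySem.Chars.splitOnMax.go]⟩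

-- splitOnMax.go with maxsplit 1: the first chunk is cur.reverse ++ (chars of l before the first '/')
theorem pv_go_one (l : List Char) : ∀ (fuel : Nat) (cur : List Char), l.length < fuel →
    ∃ tail, PySem.Chars.splitOnMax.go ['/'] fuel 1 l cur [] =
      (cur.reverse ++ l.takeWhile (fun c => c != '/')) :: tail := by
  induction l with
  | nil =>
    intro fuel cur hf
    cases fuel with
    | zero => omega
    | succ n => exact ⟨[], by simp [PySem.Chars.splitOnMax.go]⟩
  | cons c r ih =>
    intro fuel cur hf
    cases fuel with
    | zero => simp at hf
    | succ n =>
      by_cases hc : c = '/'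
      · subst hc
        obtain ⟨x, hx⟩ := pv_go_zero n r [] cur.reverse
        refine ⟨[x], ?_⟩
        simp [PySem.Chars.splitOnMax.go, List.isPrefixOf, hx]
      · have hc' : ¬('/' = c) := fun h => hc h.symm
        obtain ⟨tail, ht⟩ := ih n (c :: cur) (by simpa using Nat.lt_of_succ_lt_succ hf)
        refine ⟨tail, ?_⟩
        simp [PySem.Chars.splitOnMax.go, List.isPrefixOf, hc, hc', ht]

-- the first piece of s.split("/", 1)
theorem pv_split_head (cs : List Char) :
    ∃ tail, PySem.Chars.splitMax? cs ['/'] 1 =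
      some ((cs.takeWhile (fun c => c != '/')) :: tail) := by
  obtain ⟨tail, ht⟩ := pv_go_one cs (cs.length + 1) [] (by omega)
  exact ⟨tail, by simp [PySem.Chars.splitMax?, PySem.Chars.splitOnMax, ht]⟩

-- core equivalence per candidate: "equal or followed by '/'" ↔ "first segment equals the candidate"
theorem pv_cand (cs dl : List Char) (hd : ∀ x ∈ dl, x ≠ '/') :
    (cs = dl ∨ (dl ++ ['/']) <+: cs) ↔ cs.takeWhile (fun c => c != '/') = dl := by
  constructor
  · have h : ∀ x ∈ dl, (fun c => c != '/') x = true := fun x hx => by simp [hd x hx]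
    rintro (rfl | ⟨r, rfl⟩)
    · exact List.takeWhile_eq_self_iff.mpr h
    · rw [List.append_assoc, List.takeWhile_append]
      simp [List.takeWhile_eq_self_iff.mpr h]
  · intro ht
    have hsplit := List.takeWhile_append_dropWhile (p := fun c => c != '/') (l := cs)
    cases hdw : cs.dropWhile (fun c => c != '/') with
    | nil => left; rw [← hsplit, hdw, ht]; simp
    | cons c r =>
      have hc : (fun c => c != '/') c = false := by
        have hne : cs.dropWhile (fun c => c != '/') ≠ [] := by simp [hdw]
        have := List.head_dropWhile_not (fun c => c != '/') hne
        simpa [hdw] using this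
      have hcc : c = '/' := by simpa using hc
      refine Or.inr ⟨r, ?_⟩
      rw [List.append_assoc]
      rw [← hsplit, hdw, ht, hcc]
      simp
  -- Bool form at the String level, matching the two ports' expressions
theorem pv_candBool (s d : String) (hd : ∀ x ∈ d.toList, x ≠ '/') :
    ((s == d) || PySem.Chars.startswith s.toList (d.toList ++ ['/'])) =
      (String.ofList (s.toList.takeWhile (fun c => c != '/')) == d) := by
  rw [Bool.eq_iff_iff]
  simp only [Bool.or_eq_true, beq_iff_eq, PySem.Chars.startswith_iff,
    ← String.toList_inj, String.toList_ofList]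
  exact pv_cand s.toList d.toList hd

-- ===== VERDICT (by name: the statement is the Claim_ definition above) =====
set_option maxRecDepth 4000 in
theorem is_dev_mode_spec : Claim_equal_is_dev_mode := by
  intro branch _
  unfold Spec_is_dev_mode
  by_cases h1 : branch = ""
  · subst h1; decide
  by_cases h2 : branch = "unknown"
  · subst h2; decide
  obtain ⟨tail, hsp⟩ := pv_split_head (PySem.Str.lower branch).toList
  have hB : is_dev_mode_alt branch =
      pvDevBranches.contains
        (String.ofList ((PySem.Str.lower branch).toList.takeWhile (fun c => c != '/'))) := by
    unfold is_dev_mode_alt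
    rw [PySem.Str.splitMax?, show ("/" : String).toList = ['/'] from rfl, hsp]
    rfl
  rw [hB]
  have hg : (branch == "" || branch == "unknown") = false := by simp [h1, h2]
  simp only [is_dev_mode, hg, pvDevBranches,
    List.any_cons, List.any_nil, List.contains_cons, List.contains_nil,
    PySem.Str.startswith_eq, String.toList_append, show ("/" : String).toList = ['/'] from rfl]
  rw [pv_candBool (PySem.Str.lower branch) "dev" (by simp),
    pv_candBool (PySem.Str.lower branch) "develop" (by simp),
    pv_candBool (PySem.Str.lower branch) "development" (by simp),
    pv_candBool (PySem.Str.lower branch) "feature" (by simp),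
    pv_candBool (PySem.Str.lower branch) "fix" (by simp),
    pv_candBool (PySem.Str.lower branch) "test" (by simp),
    pv_candBool (PySem.Str.lower branch) "local" (by simp)]
  simp
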